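-- pv_equiv track=rewrite | github.com/eivholt/whoseline | script-to-dialogue.py | merge_consecutive_lines
-- ===== SOURCE A (Python) =====
-- def merge_consecutive_lines(dialog):
--     """
--     Merge consecutive lines where the same actor speaks multiple times in a row.
--     """
--     merged_dialog = []
--     for entry in dialog:
--         if merged_dialog and merged_dialog[-1]["actor"] == entry["actor"]:
--             # Merge lines if the actor is the same as the previous one
--             merged_dialog[-1]["line"] += f" {entry['line']}"
--         else:
--             # Add a new entry if the actor changes
--             merged_dialog.append(entry)
--     return merged_dialog
-- ===== SOURCE B (Python) =====
-- def merge_consecutive_lines(dialog):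
--     merged = []
--     i, n = 0, len(dialog)
--     while i < n:
--         head = dialog[i]
--         j = i + 1
--         while j < n and dialog[j]["actor"] == head["actor"]:
--             j += 1
--         if j > i + 1:
--             head["line"] = " ".join(e["line"] for e in dialog[i:j])
--         merged.append(head)
--         i = j
--     return merged
-- ===== Notes on version B (the rewrite author's own statement) =====
-- stated objective: alternative
-- what changed: A compares each entry with the last element of the growing output and repeatedly re-concatenates its line; B scans the input run by run (two-index span detection), joins each run's lines once with ' '.join, and emits one head per run.
import Mathlib
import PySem

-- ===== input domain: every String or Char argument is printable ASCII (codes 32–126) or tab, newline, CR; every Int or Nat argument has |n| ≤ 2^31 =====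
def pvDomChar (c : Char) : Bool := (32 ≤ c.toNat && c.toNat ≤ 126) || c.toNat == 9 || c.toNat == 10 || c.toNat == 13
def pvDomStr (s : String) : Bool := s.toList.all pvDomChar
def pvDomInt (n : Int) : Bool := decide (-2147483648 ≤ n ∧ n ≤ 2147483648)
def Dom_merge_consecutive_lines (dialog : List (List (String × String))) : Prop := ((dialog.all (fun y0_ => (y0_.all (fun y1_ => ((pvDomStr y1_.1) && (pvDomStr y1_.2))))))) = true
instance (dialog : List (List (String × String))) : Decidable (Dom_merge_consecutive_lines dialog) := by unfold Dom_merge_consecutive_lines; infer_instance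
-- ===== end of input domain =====

-- B replaces A's compare-with-last accumulator by a run-scan (two-index span detection plus a single join
-- per run): objective 'alternative'. Both Pythons mutate the caller's dicts in place identically; the
-- equivalence proved here is about the RETURN value.

-- ===== PORT A =====
-- shared primitives: Python dict access d[k] (first match) and str '+' under the type convention
def pvGet (e : List (String × String)) (k : String) : Option String := (PySem.Dict.mk e).get? k
def pvSet (e : List (String × String)) (k v : String) : List (String × String) :=
  ((PySem.Dict.mk e).insert k v).items
def strCat (a b : String) : String := String.ofList (a.toList ++ b.toList)  -- Python str '+', exact

-- body of A's for-loop: 'if merged_dialog and merged_dialog[-1]["actor"] == entry["actor"]: … else: append'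
def mergeStep (acc : List (List (String × String))) (entry : List (String × String)) :
    List (List (String × String)) :=
  match acc.getLast? with
  | some last =>
      if pvGet last "actor" = pvGet entry "actor" then
        acc.dropLast ++
          [pvSet last "line"
            (strCat ((pvGet last "line").getD "") (strCat " " ((pvGet entry "line").getD "")))]
      else acc ++ [entry]
  | none => acc ++ [entry]

def merge_consecutive_lines (dialog : List (List (String × String))) : List (List (String × String)) :=
  dialog.foldl mergeStep []

-- ===== PORT B =====
-- ' '.join(e["line"] for e in run)
def lineJoin (es : List (List (String × String))) : String :=
  PySem.Str.join " " (es.map (fun e => (pvGet e "line").getD ""))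

-- Source B's outer while: take the whole run of the head's actor, join its lines once, continue after it
def altGo : List (List (String × String)) → List (List (String × String))
  | [] => []
  | x :: rest =>
      (if (rest.takeWhile (fun e => pvGet e "actor" == pvGet x "actor")).isEmpty then x
       else pvSet x "line" (lineJoin (x :: rest.takeWhile (fun e => pvGet e "actor" == pvGet x "actor")))) ::
      altGo (rest.dropWhile (fun e => pvGet e "actor" == pvGet x "actor"))
termination_by l => l.length
decreasing_by
  simpa using Nat.lt_succ_of_le (List.length_dropWhile_le _ _)

def merge_consecutive_lines_alt (dialog : List (List (String × String))) :
    List (List (String × String)) :=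
  altGo dialog

-- ===== PRECONDITION & SPEC =====
-- Pre_ is exactly where the Python A returns: with ≥ 2 entries every entry must carry "actor" (KeyError
-- otherwise), and both members of any adjacent same-actor pair must carry "line" (the merge reads both).
def Pre_merge_consecutive_lines (dialog : List (List (String × String))) : Prop :=
  dialog.length ≤ 1 ∨
    ((∀ e ∈ dialog, (pvGet e "actor").isSome) ∧
      ∀ p ∈ dialog.zip dialog.tail,
        pvGet p.1 "actor" = pvGet p.2 "actor" →
          (pvGet p.1 "line").isSome ∧ (pvGet p.2 "line").isSome)
instance (dialog : List (List (String × String))) : Decidable (Pre_merge_consecutive_lines dialog) := by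
  unfold Pre_merge_consecutive_lines; infer_instance

def pvWitness_merge_consecutive_lines : (List (List (String × String))) :=
  [[("actor", "A"), ("line", "hi")], [("actor", "A"), ("line", "there")], [("actor", "B"), ("line", "yo")]]

def Spec_merge_consecutive_lines (dialog : List (List (String × String)))
    (out : List (List (String × String))) : Prop := out = merge_consecutive_lines_alt dialog
instance (dialog : List (List (String × String))) (out : List (List (String × String))) :
    Decidable (Spec_merge_consecutive_lines dialog out) := by
  unfold Spec_merge_consecutive_lines; infer_instance

-- ===== CLAIM (what is proved, stated in full; the proofs are below) =====
def Claim_equal_merge_consecutive_lines : Prop := ∀ (dialog : List (List (String × String))), Dom_merge_consecutive_lines dialog → Pre_merge_consecutive_lines dialog → Spec_merge_consecutive_lines dialog (merge_consecutive_lines dialog)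

-- ===== LEMMAS AND PROOFS =====

theorem pv_mk_items (d : PySem.Dict String String) : PySem.Dict.mk d.items = d := rfl

theorem pvGet_pvSet_ne (e : List (String × String)) (k k' v : String) (h : k' ≠ k) :
    pvGet (pvSet e k v) k' = pvGet e k' := by
  unfold pvGet pvSet
  rw [pv_mk_items, PySem.Dict.get?_insert]
  simp [h]

theorem pvGet_pvSet_self (e : List (String × String)) (k v : String) :
    pvGet (pvSet e k v) k = some v := by
  unfold pvGet pvSet
  rw [pv_mk_items, PySem.Dict.get?_insert]
  simp

theorem pvSet_pvSet (e : List (String × String)) (k v w : String) :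
    pvSet (pvSet e k v) k w = pvSet e k w := by
  unfold pvSet
  rw [pv_mk_items, PySem.Dict.insert_insert_self]

-- ' '.join with a pre-concatenated first piece is the join of the pieces
theorem join_pair (a b : String) :
    PySem.Str.join " " [a, b] = strCat a (strCat " " b) := by
  simp only [PySem.Str.join, strCat, String.toList_ofList, List.map_cons, List.map_nil]
  rw [PySem.Chars.join_cons_cons, PySem.Chars.join_singleton, List.append_assoc]

theorem join_merge (a b : String) (ls : List String) :
    PySem.Str.join " " (strCat a (strCat " " b) :: ls) = PySem.Str.join " " (a :: b :: ls) := by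
  cases ls with
  | nil =>
      simp only [PySem.Str.join, strCat, String.toList_ofList, List.map_cons, List.map_nil]
      rw [PySem.Chars.join_singleton, PySem.Chars.join_cons_cons, PySem.Chars.join_singleton]
      simp
  | cons c cs =>
      simp only [PySem.Str.join, strCat, String.toList_ofList, List.map_cons]
      rw [PySem.Chars.join_cons_cons, PySem.Chars.join_cons_cons, PySem.Chars.join_cons_cons]
      simp

theorem mergeStep_ne_nil (acc : List (List (String × String))) (e : List (String × String)) :
    mergeStep acc e ≠ [] := by
  unfold mergeStep
  split
  · split_ifs <;> simp
  · simp

theorem mergeStep_shift (init acc : List (List (String × String))) (e : List (String × String))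
    (h : acc ≠ []) : mergeStep (init ++ acc) e = init ++ mergeStep acc e := by
  have hg : (init ++ acc).getLast? = acc.getLast? := List.getLast?_append_of_ne_nil _ h
  have hd : (init ++ acc).dropLast = init ++ acc.dropLast := List.dropLast_append_of_ne_nil h
  unfold mergeStep
  simp only [hg, hd]
  split
  · split_ifs <;> simp
  · simp

theorem foldl_shift (l : List (List (String × String))) :
    ∀ init acc, acc ≠ [] → l.foldl mergeStep (init ++ acc) = init ++ l.foldl mergeStep acc := by
  induction l with
  | nil => intro init acc _; simp
  | cons e t ih =>
      intro init acc h
      rw [List.foldl_cons, List.foldl_cons, mergeStep_shift init acc e h,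
        ih init (mergeStep acc e) (mergeStep_ne_nil acc e)]

theorem absorb (t : List (List (String × String))) (x e : List (String × String))
    (h : pvGet e "actor" = pvGet x "actor") :
    altGo (pvSet x "line"
      (strCat ((pvGet x "line").getD "") (strCat " " ((pvGet e "line").getD ""))) :: t) =
    altGo (x :: e :: t) := by
  have hact : pvGet (pvSet x "line"
      (strCat ((pvGet x "line").getD "") (strCat " " ((pvGet e "line").getD "")))) "actor" =
      pvGet x "actor" := pvGet_pvSet_ne x "line" "actor" _ (by decide)
  have hpe : (pvGet e "actor" == pvGet x "actor") = true := by simp [h]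
  conv_lhs => rw [altGo]
  conv_rhs => rw [altGo]
  rw [hact]
  simp only [List.takeWhile_cons, List.dropWhile_cons, hpe, if_true]
  congr 1
  cases hr : t.takeWhile (fun e' => pvGet e' "actor" == pvGet x "actor") with
  | nil =>
      simp only [List.isEmpty_nil, List.isEmpty_cons, if_true, Bool.false_eq_true, if_false]
      rw [show lineJoin [x, e] = PySem.Str.join " "
        [(pvGet x "line").getD "", (pvGet e "line").getD ""] from rfl, join_pair]
  | cons c cs =>
      simp only [List.isEmpty_cons, Bool.false_eq_true, if_false]
      rw [pvSet_pvSet]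
      congr 1
      unfold lineJoin
      simp only [List.map_cons, pvGet_pvSet_self, Option.getD_some]
      exact join_merge _ _ _

theorem main_lemma (l : List (List (String × String))) :
    ∀ x, l.foldl mergeStep [x] = altGo (x :: l) := by
  induction l with
  | nil =>
      intro x
      simp [altGo]
  | cons e t ih =>
      intro x
      rw [List.foldl_cons]
      have hstep : mergeStep [x] e =
          if pvGet x "actor" = pvGet e "actor" then
            [pvSet x "line"
              (strCat ((pvGet x "line").getD "") (strCat " " ((pvGet e "line").getD "")))]
          else [x, e] := by
        unfold mergeStep
        simp
      by_cases h : pvGet x "actor" = pvGet e "actor"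
      · rw [hstep, if_pos h, ih _]
        exact absorb t x e h.symm
      · rw [hstep, if_neg h, show ([x, e] : List (List (String × String))) = [x] ++ [e] from rfl,
          foldl_shift t [x] [e] (by simp), ih e]
        have hne : (pvGet e "actor" == pvGet x "actor") = false := by
          simp only [beq_eq_false_iff_ne, ne_eq]
          intro hc
          exact h hc.symm
        conv_rhs => rw [altGo]
        simp [hne]

-- ===== VERDICT (by name: the statement is the Claim_ definition above) =====
theorem merge_consecutive_lines_spec : Claim_equal_merge_consecutive_lines := by
  intro dialog _ _
  unfold Spec_merge_consecutive_lines merge_consecutive_lines merge_consecutive_lines_alt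
  cases dialog with
  | nil => simp [altGo]
  | cons x l =>
      rw [List.foldl_cons]
      have hstep : mergeStep [] x = [x] := by unfold mergeStep; simp
      rw [hstep, main_lemma l x]
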